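-- pv_equiv track=rewrite | github.com/cristianfreire/Escalonamento_Processos_Threads | B - SJF/sjf.py | TempoEspera
-- ===== SOURCE A (Python) =====
-- def TempoEspera(processos):
--     tempo_servico=[0]*len(processos)
--     tempo_espera=[0]*len(processos)
--     for x in range(1, len(processos)):
--         tempo_servico[x]=(tempo_servico[x-1]+processos[x-1][2])
--         tempo_espera[x]=tempo_servico[x]-processos[x][1]
--         if (tempo_espera[x]<0):
--             tempo_espera[x]=0
--     return tempo_espera
-- ===== SOURCE B (Python) =====
-- def TempoEspera(processos):
--     # Per-index recomputation: the waiting time of process x is the total burst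
--     # of all earlier processes (recomputed directly from the prefix slice) minus
--     # its arrival, clamped at zero; process 0 waits 0.
--     return [0 if x == 0 else max(0, sum(p[2] for p in processos[:x]) - proc[1])
--             for x, proc in enumerate(processos)]
-- ===== Notes on version B (the rewrite author's own statement) =====
-- stated objective: alternative
-- what changed: A's single stateful loop carrying a running service-time accumulator across two mutated arrays is replaced by a stateless per-index computation: for each enumerated process the service time is recomputed directly as the sum over its prefix slice, trading O(n) for O(n^2) in exchange for eliminating all loop-carried state.
import Mathlib
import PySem

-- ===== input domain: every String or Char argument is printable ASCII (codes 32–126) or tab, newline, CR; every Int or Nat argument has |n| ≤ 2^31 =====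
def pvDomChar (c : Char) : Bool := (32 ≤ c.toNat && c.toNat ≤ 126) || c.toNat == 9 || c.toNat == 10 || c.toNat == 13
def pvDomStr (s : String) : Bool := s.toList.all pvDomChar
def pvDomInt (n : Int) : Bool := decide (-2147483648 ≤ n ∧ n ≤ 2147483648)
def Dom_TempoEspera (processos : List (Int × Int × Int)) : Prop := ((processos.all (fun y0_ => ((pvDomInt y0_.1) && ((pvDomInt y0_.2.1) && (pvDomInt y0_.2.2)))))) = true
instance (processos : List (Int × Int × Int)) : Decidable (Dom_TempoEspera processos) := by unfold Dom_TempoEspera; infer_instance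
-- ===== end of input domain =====

-- B replaces A's stateful running-accumulator loop by a stateless per-index recomputation of the
-- service sum over each prefix slice (alternative decomposition; B is O(n^2), A is O(n)).

-- ===== PORT A =====
-- A: allocate two zero arrays, loop x = 1..n-1 mutating servico[x] then espera[x] in place, clamping a negative espera[x] to 0.
def TempoEspera (processos : List (Int × Int × Int)) : List Int :=
  ((PySem.List.pyRange 1 (processos.length : Int) 1).foldl (fun (st : List Int × List Int) (x : Int) =>
      let servico := PySem.List.pySetD st.1 x
        (PySem.List.pyGetD st.1 (x - 1) 0 + (PySem.List.pyGetD processos (x - 1) (0, 0, 0)).2.2)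
      let e := PySem.List.pyGetD servico x 0 - (PySem.List.pyGetD processos x (0, 0, 0)).2.1
      let espera := PySem.List.pySetD st.2 x (if e < 0 then 0 else e)
      (servico, espera))
    (List.replicate processos.length 0, List.replicate processos.length 0)).2

-- ===== PORT B =====
-- B: for each enumerated (x, proc), waiting time is 0 at x = 0, else the burst sum over the
-- prefix slice processos[:x] minus proc's arrival, clamped at 0 with max.
def TempoEspera_alt (processos : List (Int × Int × Int)) : List Int :=
  (PySem.List.enumerate processos 0).map (fun xp =>
    if xp.1 == 0 then 0
    else max 0 (((PySem.List.slice processos none (some xp.1)).map (fun p => p.2.2)).sum - xp.2.2.1))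

-- ===== PRECONDITION & SPEC =====
def Spec_TempoEspera (processos : List (Int × Int × Int)) (out : List Int) : Prop := out = TempoEspera_alt processos
instance (processos : List (Int × Int × Int)) (out : List Int) : Decidable (Spec_TempoEspera processos out) := by unfold Spec_TempoEspera; infer_instance

-- ===== CLAIM (what is proved, stated in full; the proofs are below) =====
def Claim_equal_TempoEspera : Prop := ∀ (processos : List (Int × Int × Int)), Dom_TempoEspera processos → Spec_TempoEspera processos (TempoEspera processos)

-- ===== LEMMAS AND PROOFS =====

-- prefix sum of the service (third) components of the first k processes
def svc (P : List (Int × Int × Int)) (k : Nat) : Int := ((P.take k).map (fun p => p.2.2)).sum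

-- the waiting time both programs compute at index j
def wt (P : List (Int × Int × Int)) (j : Nat) : Int :=
  if j = 0 then 0 else max 0 (svc P j - (P.getD j (0, 0, 0)).2.1)

theorem svc_succ (P : List (Int × Int × Int)) (k : Nat) (hk : k < P.length) :
    svc P (k + 1) = svc P k + (P.getD k (0, 0, 0)).2.2 := by
  unfold svc
  rw [List.getD_eq_getElem P _ hk]
  simp only [List.map_take]
  rw [List.take_add_one]
  simp [List.getElem?_map, List.getElem?_eq_getElem hk]

theorem set_map_range {β : Type} (f : Nat → β) (n k : Nat) (v : β) :
    ((List.range n).map f).set k v = (List.range n).map (fun j => if j = k then v else f j) := by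
  apply List.ext_getElem
  · simp
  · intro i h1 h2
    simp only [List.getElem_set, List.getElem_map, List.getElem_range]
    split_ifs with h h' h' <;> first | rfl | omega

theorem getD_map_range_int {β : Type} (f : Nat → β) (n k : Nat) (d : β) (hk : k < n) :
    PySem.List.pyGetD ((List.range n).map f) (k : Int) d = f k := by
  rw [PySem.List.pyGetD_natCast, PySem.List.getD_map_range f n k d hk]

theorem map_range_zero (g : Nat → Int) (h : ∀ j, g j = 0) (n : Nat) :
    (List.range n).map g = List.replicate n 0 := by
  rw [funext h]
  simp

-- A's loop invariant: after processing x = 1..k-1, entry j of servico holds svc j for the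
-- initialized indices and entry j of espera holds wt j for j < k
theorem a_inv (P : List (Int × Int × Int)) (k : Nat) (hk : k ≤ P.length) :
    ((PySem.List.pyRange 1 (k : Int) 1).foldl (fun (st : List Int × List Int) (x : Int) =>
      let servico := PySem.List.pySetD st.1 x
        (PySem.List.pyGetD st.1 (x - 1) 0 + (PySem.List.pyGetD P (x - 1) (0, 0, 0)).2.2)
      let e := PySem.List.pyGetD servico x 0 - (PySem.List.pyGetD P x (0, 0, 0)).2.1
      let espera := PySem.List.pySetD st.2 x (if e < 0 then 0 else e)
      (servico, espera))
    (List.replicate P.length 0, List.replicate P.length 0))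
    = ((List.range P.length).map (fun j => if j < k ∨ j = 0 then svc P j else 0),
       (List.range P.length).map (fun j => if j < k then wt P j else 0)) := by
  induction k with
  | zero =>
    rw [PySem.List.pyRange_one_eq_nil (by norm_num)]
    simp only [List.foldl_nil, Prod.mk.injEq]
    constructor
    · rw [map_range_zero]
      intro j; split_ifs with h
      · rcases h with h | h
        · omega
        · simp [h, svc]
      · rfl
    · rw [map_range_zero]
      intro j; split_ifs with h
      · omega
      · rfl
  | succ k ih =>
    have hk' : k ≤ P.length := Nat.le_of_succ_le hk
    have hkn : k < P.length := hk
    by_cases hk0 : k = 0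
    · subst hk0
      rw [show ((0 + 1 : Nat) : Int) = 1 by norm_num, PySem.List.pyRange_one_eq_nil (by norm_num)]
      simp only [List.foldl_nil, Prod.mk.injEq]
      constructor
      · rw [map_range_zero]
        intro j; split_ifs with h
        · have : j = 0 := by omega
          simp [this, svc]
        · rfl
      · rw [map_range_zero]
        intro j; split_ifs with h
        · have : j = 0 := by omega
          simp [this, wt]
        · rfl
    · have h1k : 1 ≤ k := Nat.one_le_iff_ne_zero.mpr hk0
      have hcast : ((k + 1 : Nat) : Int) = (k : Int) + 1 := by push_cast; ring
      rw [hcast, PySem.List.pyRange_one_succ_right (by exact_mod_cast h1k), List.foldl_append,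
        ih hk']
      simp only [List.foldl_cons, List.foldl_nil]
      have hx1 : (k : Int) - 1 = ((k - 1 : Nat) : Int) := by push_cast [h1k]; ring
      have hsub : k - 1 + 1 = k := Nat.sub_add_cancel h1k
      have hgS : PySem.List.pyGetD
          ((List.range P.length).map (fun j => if j < k ∨ j = 0 then svc P j else 0)) ((k:Int) - 1) 0
          = svc P (k - 1) := by
        rw [hx1, getD_map_range_int _ _ _ _ (by omega)]
        rw [if_pos (Or.inl (by omega : k - 1 < k))]
      have hgP : PySem.List.pyGetD P ((k:Int) - 1) (0,0,0) = P.getD (k - 1) (0,0,0) := by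
        rw [hx1, PySem.List.pyGetD_natCast]
      have hv : svc P (k - 1) + (P.getD (k - 1) (0,0,0)).2.2 = svc P k := by
        rw [← svc_succ P (k - 1) (by omega), hsub]
      simp only [hgS, hgP, hv, PySem.List.pySetD_natCast, set_map_range]
      have hgS2 : PySem.List.pyGetD
          ((List.range P.length).map
            (fun j => if j = k then svc P k else if j < k ∨ j = 0 then svc P j else 0)) ((k:Int)) 0
          = svc P k := by
        rw [getD_map_range_int _ _ _ _ hkn]
        simp
      have hgP2 : PySem.List.pyGetD P ((k:Int)) (0,0,0) = P.getD k (0,0,0) := by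
        rw [PySem.List.pyGetD_natCast]
      rw [hgS2, hgP2]
      simp only [Prod.mk.injEq]
      constructor
      · apply List.map_congr_left
        intro j hj
        by_cases h : j = k
        · simp [h, hk0]
        · simp only [if_neg h]
          have : (j < k + 1 ∨ j = 0) ↔ (j < k ∨ j = 0) := by omega
          rw [if_congr this rfl rfl]
      · apply List.map_congr_left
        intro j hj
        by_cases h : j = k
        · subst h
          simp only [if_pos (by omega : j < j + 1), wt, if_neg hk0]
          simp only [if_true]
          by_cases h2 : svc P j - (P.getD j (0,0,0)).2.1 < 0
          · rw [if_pos h2, max_eq_left (by omega)]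
          · rw [if_neg h2, max_eq_right (by omega)]
        · simp only [if_neg h]
          have : (j < k + 1) ↔ (j < k) := by omega
          rw [if_congr this rfl rfl]

-- B's enumerate-map produces exactly the waiting-time table
theorem b_eq_wt (P : List (Int × Int × Int)) :
    TempoEspera_alt P = (List.range P.length).map (wt P) := by
  unfold TempoEspera_alt
  apply List.ext_getElem
  · simp [PySem.List.length_enumerate]
  · intro i h1 h2
    have hi : i < P.length := by simpa [PySem.List.length_enumerate] using h1
    simp only [List.getElem_map, List.getElem_range, PySem.List.getElem_enumerate, zero_add, wt]
    by_cases h0 : i = 0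
    · simp [h0]
    · have : ((i : Int) == 0) = false := by
        rw [beq_eq_false_iff_ne]
        exact_mod_cast h0
      rw [this, if_neg h0]
      simp only [Bool.false_eq_true, if_false]
      rw [PySem.List.slice_to_natCast]
      have : P[i] = P.getD i (0, 0, 0) := (List.getD_eq_getElem P _ hi).symm
      rw [this]
      rfl

-- ===== VERDICT (by name: the statement is the Claim_ definition above) =====
theorem TempoEspera_spec : Claim_equal_TempoEspera := by
  intro P _
  unfold Spec_TempoEspera
  rw [b_eq_wt]
  unfold TempoEspera
  rw [a_inv P P.length le_rfl]
  apply List.map_congr_left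
  intro j hj
  rw [if_pos (List.mem_range.mp hj)]
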